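-- pv_equiv track=rewrite | github.com/gauravfs-14/crash-www26 | utils/neo4j_graph.py | _assess_crash_severity
-- ===== SOURCE A (Python) =====
-- from typing import List, Dict, Any, Optional
--
-- def _assess_crash_severity(events: List[Dict]) -> str:
--     """Assess overall crash severity based on events."""
--     if not events:
--         return "Unknown"
--
--     # Check for fatal events
--     for event in events:
--         outcome = event.get("outcome", "").lower()
--         if any(word in outcome for word in ['fatal', 'death', 'killed']):
--             return "Fatal"
--
--     # Check for injury events
--     for event in events:
--         outcome = event.get("outcome", "").lower()
--         if any(word in outcome for word in ['injury', 'injured', 'hospital']):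
--             return "Injury"
--
--     return "Property_Damage"
-- ===== SOURCE B (Python) =====
-- def _assess_crash_severity(events):
--     """Assess overall crash severity based on events (single pass)."""
--     if not events:
--         return "Unknown"
--     injury = False
--     for event in events:
--         outcome = event.get("outcome", "").lower()
--         if any(word in outcome for word in ('fatal', 'death', 'killed')):
--             return "Fatal"
--         if any(word in outcome for word in ('injury', 'injured', 'hospital')):
--             injury = True
--     return "Injury" if injury else "Property_Damage"
-- ===== Notes on version B (the rewrite author's own statement) =====
-- stated objective: alternative
-- what changed: Replaced A's two full scans over events (one for fatal words, one for injury words) by a single pass that returns 'Fatal' immediately and maintains an injury flag, deferring the 'Injury' decision to the end so a later fatal event still wins.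
import Mathlib
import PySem

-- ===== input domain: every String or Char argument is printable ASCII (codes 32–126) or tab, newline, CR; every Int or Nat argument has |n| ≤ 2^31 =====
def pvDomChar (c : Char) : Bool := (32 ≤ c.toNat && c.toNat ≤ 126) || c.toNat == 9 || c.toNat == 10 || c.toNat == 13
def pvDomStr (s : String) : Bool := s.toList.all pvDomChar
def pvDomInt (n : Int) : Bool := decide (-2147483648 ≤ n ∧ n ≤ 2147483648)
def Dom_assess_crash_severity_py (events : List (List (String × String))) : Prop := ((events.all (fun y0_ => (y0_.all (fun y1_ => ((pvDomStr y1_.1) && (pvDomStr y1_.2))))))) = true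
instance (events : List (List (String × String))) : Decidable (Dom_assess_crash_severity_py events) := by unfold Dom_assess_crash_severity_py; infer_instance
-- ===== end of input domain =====

-- B replaces A's two full scans by a single pass that returns "Fatal" immediately and
-- defers "Injury" via a maintained flag; alternative decomposition, same asymptotic cost.


-- ===== PORT A =====
-- outcome = event.get("outcome", "").lower()
def pvOutcome (event : List (String × String)) : String :=
  PySem.Str.lower ((PySem.Dict.mk event).getD "outcome" "")

-- any(word in outcome for word in ['fatal', 'death', 'killed'])
def pvHasFatal (outcome : String) : Bool :=
  ["fatal", "death", "killed"].any (fun word => PySem.Str.isIn word outcome)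

-- any(word in outcome for word in ['injury', 'injured', 'hospital'])
def pvHasInjury (outcome : String) : Bool :=
  ["injury", "injured", "hospital"].any (fun word => PySem.Str.isIn word outcome)

-- A: guard, then a fatal scan over all events, then an injury scan over all events.
def assess_crash_severity_py (events : List (List (String × String))) : String :=
  if events = [] then "Unknown"
  else if events.any (fun event => pvHasFatal (pvOutcome event)) then "Fatal"
  else if events.any (fun event => pvHasInjury (pvOutcome event)) then "Injury"
  else "Property_Damage"

-- ===== PORT B =====
-- single pass: early return on a fatal outcome, injury flag carried through the loop
def pvScan (events : List (List (String × String))) (injury : Bool) : String :=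
  match events with
  | [] => if injury then "Injury" else "Property_Damage"
  | event :: rest =>
    let outcome := pvOutcome event
    if pvHasFatal outcome then "Fatal"
    else pvScan rest (injury || pvHasInjury outcome)

def assess_crash_severity_py_alt (events : List (List (String × String))) : String :=
  if events = [] then "Unknown" else pvScan events false

-- ===== PRECONDITION & SPEC =====
def Spec_assess_crash_severity_py (events : List (List (String × String))) (out : String) : Prop := out = assess_crash_severity_py_alt events
instance (events : List (List (String × String))) (out : String) : Decidable (Spec_assess_crash_severity_py events out) := by unfold Spec_assess_crash_severity_py; infer_instance

-- ===== CLAIM (what is proved, stated in full; the proofs are below) =====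
def Claim_equal_assess_crash_severity_py : Prop := ∀ (events : List (List (String × String))), Dom_assess_crash_severity_py events → Spec_assess_crash_severity_py events (assess_crash_severity_py events)

-- ===== LEMMAS AND PROOFS =====
lemma pvScan_eq (events : List (List (String × String))) :
    ∀ injury : Bool, pvScan events injury =
      if events.any (fun event => pvHasFatal (pvOutcome event)) then "Fatal"
      else if injury || events.any (fun event => pvHasInjury (pvOutcome event)) then "Injury"
      else "Property_Damage" := by
  induction events with
  | nil => intro injury; simp [pvScan]
  | cons e rest ih =>
    intro injury
    simp only [pvScan, List.any_cons]
    by_cases hf : pvHasFatal (pvOutcome e)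
    · simp [hf]
    · simp only [hf, Bool.false_or, ih]
      by_cases hr : rest.any (fun event => pvHasFatal (pvOutcome event))
      · simp [hr]
      · simp only [hr]
        by_cases hi : pvHasInjury (pvOutcome e) <;> simp [hi]

-- ===== VERDICT (by name: the statement is the Claim_ definition above) =====
theorem assess_crash_severity_py_spec : Claim_equal_assess_crash_severity_py := by
  intro events _
  unfold Spec_assess_crash_severity_py assess_crash_severity_py assess_crash_severity_py_alt
  by_cases h : events = []
  · simp [h]
  · simp only [h, if_false, pvScan_eq, Bool.false_or]
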